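-- pv_equiv track=rewrite | github.com/alvaroibrwork/recurrency | experiments/graphsmethod.py | disjoint_lists
-- ===== SOURCE A (Python) =====
-- def disjoint_lists (input_l):
--
--     #order from longest to shortest list
--     input_l.sort(key=len, reverse=True)
--
--     candidate = input_l.copy()
--
--     for i in range(0, len(input_l)-1):
--
--         input_l = candidate.copy()
--
--         if i > len(input_l):
--             break
--         #reset the input list to only compute intersection between lists that remain as candidates
--
--         for j in range(i+1,len(candidate)):
--
--             #if two list have non null interception, remove the second list, which is shorter
--             if set(input_l[i]) & set(input_l[j]):
--                 candidate.remove(input_l[j])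
--
--     return candidate
-- ===== SOURCE B (Python) =====
-- def disjoint_lists(input_l):
--     # same in-place sort side effect as A; return value is the greedy selection
--     input_l.sort(key=len, reverse=True)
--     kept = []
--     used = set()
--     for xs in input_l:
--         if used.isdisjoint(xs):
--             kept.append(xs)
--             used.update(xs)
--     return kept
-- ===== Notes on version B (the rewrite author's own statement) =====
-- stated objective: faster
-- what changed: Replaces the quadratic pass structure (re-snapshotting the candidate list and calling set()/list.remove inside a nested loop) by a single pass over the sorted list with one accumulated used-element set.
-- outside the precondition, e.g. on disjoint_lists([[0], [1], [0]]): A returns [[1], [0]], B returns [[0], [1]]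
import Mathlib
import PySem

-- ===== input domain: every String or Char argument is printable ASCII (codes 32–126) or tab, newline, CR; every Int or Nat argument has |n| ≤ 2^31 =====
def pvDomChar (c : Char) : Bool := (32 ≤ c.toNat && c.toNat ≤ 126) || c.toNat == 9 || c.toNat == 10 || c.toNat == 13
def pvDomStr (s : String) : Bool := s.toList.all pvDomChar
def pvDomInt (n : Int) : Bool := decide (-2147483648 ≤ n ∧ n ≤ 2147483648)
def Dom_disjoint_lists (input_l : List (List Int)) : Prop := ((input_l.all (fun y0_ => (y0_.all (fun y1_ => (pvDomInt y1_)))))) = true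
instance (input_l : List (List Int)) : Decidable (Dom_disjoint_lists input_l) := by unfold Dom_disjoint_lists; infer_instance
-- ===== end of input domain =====

-- B replaces A's nested re-scanning passes by one pass over the length-sorted list with an
-- accumulated used-element set (same greedy result; A's in-place sort mutation is kept by B;
-- the equivalence proved is about the RETURN value).

-- ===== PORT A =====
-- input_l.sort(key=len, reverse=True)  (shared by both Pythons verbatim)
def sortLen (l : List (List Int)) : List (List Int) :=
  PySem.List.sorted l (fun x => x.length) true

-- truthiness of set(a) & set(b)
def pyInter (a b : List Int) : Bool :=
  !(PySem.Set.inter (PySem.Set.ofList a) (PySem.Set.ofList b)).isEmpty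

-- candidate.remove(v); Python raises ValueError when v is absent — unreachable under Pre_
def removeD (c : List (List Int)) (v : List Int) : List (List Int) :=
  match PySem.List.remove? c v with
  | some c' => c'
  | none => c

-- inner loop: for j in range(i+1, len(candidate)) over the snapshot s, mutating c
def aPass (s : List (List Int)) (i : Nat) (j : Nat) (c : List (List Int)) : List (List Int) :=
  if _h : j < s.length then
    aPass s i (j + 1)
      (if pyInter (s.getD i []) (s.getD j []) then removeD c (s.getD j []) else c)
  else c
  termination_by s.length - j

-- outer loop: for i in range(0, len(input_l)-1), with the 'if i > len(input_l): break' guard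
def aOuter : Nat → Nat → List (List Int) → List (List Int)
  | 0, _, cand => cand
  | k + 1, i, cand =>
    if i > cand.length then cand
    else aOuter k (i + 1) (aPass cand i (i + 1) cand)

def disjoint_lists (input_l : List (List Int)) : List (List Int) :=
  let s := sortLen input_l
  aOuter (s.length - 1) 0 s

-- ===== PORT B =====
def bStep (acc : List (List Int) × PySem.Set Int) (xs : List Int) : List (List Int) × PySem.Set Int :=
  if PySem.Set.isdisjoint acc.2 xs then (acc.1 ++ [xs], PySem.Set.update acc.2 xs) else acc

def disjoint_lists_alt (input_l : List (List Int)) : List (List Int) :=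
  ((sortLen input_l).foldl bStep ([], PySem.Set.empty)).1

-- ===== PRECONDITION & SPEC =====
-- Pre_ excludes inputs containing duplicate (equal) inner lists: there A's candidate.remove
-- deletes the FIRST equal copy, an accidental first-vs-last-match choice that permutes the output.
def Pre_disjoint_lists (input_l : List (List Int)) : Prop := input_l.Nodup
instance (input_l : List (List Int)) : Decidable (Pre_disjoint_lists input_l) := by unfold Pre_disjoint_lists; infer_instance
def pvWitness_disjoint_lists : List (List Int) := [[1, 2], [3], [2, 5]]

def Spec_disjoint_lists (input_l : List (List Int)) (out : List (List Int)) : Prop := out = disjoint_lists_alt input_l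
instance (input_l : List (List Int)) (out : List (List Int)) : Decidable (Spec_disjoint_lists input_l out) := by unfold Spec_disjoint_lists; infer_instance

-- ===== CLAIM (what is proved, stated in full; the proofs are below) =====
def Claim_equal_disjoint_lists : Prop := ∀ (input_l : List (List Int)), Dom_disjoint_lists input_l → Pre_disjoint_lists input_l → Spec_disjoint_lists input_l (disjoint_lists input_l)

-- ===== LEMMAS AND PROOFS =====

-- the common greedy result, phrased as "each kept head filters its conflicts out of the tail"
def Qrun : List (List Int) → List (List Int)
  | [] => []
  | x :: t => x :: Qrun (t.filter (fun y => !pyInter x y))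
  termination_by l => l.length
  decreasing_by
    simpa using Nat.lt_succ_of_le (le_trans (List.length_filter_le _ _) (le_of_eq (List.length_attach)))

-- B's loop, with the used-set explicit
def gr (used : PySem.Set Int) : List (List Int) → List (List Int)
  | [] => []
  | x :: t =>
    if PySem.Set.isdisjoint used x then x :: gr (PySem.Set.update used x) t else gr used t

lemma pyInter_iff (a b : List Int) : pyInter a b = true ↔ ∃ v, v ∈ a ∧ v ∈ b := by
  unfold pyInter
  simp only [Bool.not_eq_true', List.isEmpty_eq_false_iff, ← List.length_pos_iff, ne_eq]
  constructor
  · intro h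
    rcases List.exists_mem_of_length_pos (by omega) with ⟨v, hv⟩
    exact ⟨v, by simpa [PySem.Set.mem_ofList] using ((PySem.Set.mem_inter _ _ _).mp hv)⟩
  · rintro ⟨v, ha, hb⟩
    have : v ∈ PySem.Set.inter (PySem.Set.ofList a) (PySem.Set.ofList b) :=
      (PySem.Set.mem_inter _ _ _).mpr ⟨by simpa [PySem.Set.mem_ofList], by simpa [PySem.Set.mem_ofList]⟩
    exact List.length_pos_of_mem this

lemma mem_update_iff (u : PySem.Set Int) (xs : List Int) (v : Int) :
    v ∈ PySem.Set.update u xs ↔ v ∈ u ∨ v ∈ xs := by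
  rw [PySem.Set.update_eq_append_filter]
  by_cases hu : v ∈ u
  · simp [hu]
  · simp [List.mem_filter, PySem.Set.mem_ofList, hu]

lemma isdisjoint_iff' (u : PySem.Set Int) (xs : List Int) :
    PySem.Set.isdisjoint u xs = true ↔ ∀ v ∈ u, v ∉ xs :=
  PySem.Set.isdisjoint_iff u xs

-- B's foldl accumulates kept ++ gr used rest
lemma foldl_bStep (l : List (List Int)) :
    ∀ kept used, (l.foldl bStep (kept, used)).1 = kept ++ gr used l := by
  induction l with
  | nil => simp [gr]
  | cons x t ih =>
    intro kept used
    by_cases h : PySem.Set.isdisjoint used x = true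
    · simp [bStep, h, gr, ih]
    · simp [bStep, h, gr, ih]

-- elements conflicting with a fully-used list are skipped by gr anyway
lemma gr_filter (x : List Int) : ∀ (t : List (List Int)) (u : PySem.Set Int),
    (∀ v ∈ x, v ∈ u) → gr u t = gr u (t.filter (fun y => !pyInter x y)) := by
  intro t
  induction t with
  | nil => intro u _; rfl
  | cons y t ih =>
    intro u hx
    by_cases hi : pyInter x y = true
    · rcases (pyInter_iff x y).mp hi with ⟨v, hvx, hvy⟩
      have hd : PySem.Set.isdisjoint u y = false := by
        cases hdy : PySem.Set.isdisjoint u y with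
        | false => rfl
        | true => exact absurd hvy ((isdisjoint_iff' u y).mp hdy v (hx v hvx))
      simp [gr, hd, hi, ih u hx]
    · have hi' : pyInter x y = false := by simpa using hi
      by_cases hd : PySem.Set.isdisjoint u y = true
      · have hsub : ∀ v ∈ x, v ∈ PySem.Set.update u y :=
          fun v hv => (mem_update_iff _ _ _).mpr (Or.inl (hx v hv))
        simp [gr, hd, hi', ih _ hsub]
      · simp [gr, Bool.eq_false_iff.mpr hd, hi', ih u hx]

-- gr equals Qrun once nothing in the tail touches the used set
lemma gr_eq_Qrun : ∀ (n : Nat) (t : List (List Int)) (u : PySem.Set Int), t.length ≤ n →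
    (∀ y ∈ t, PySem.Set.isdisjoint u y = true) → gr u t = Qrun t := by
  intro n
  induction n with
  | zero => intro t u ht _; rw [List.length_eq_zero_iff.mp (Nat.le_zero.mp ht)]; simp [gr, Qrun]
  | succ n ih =>
    intro t u ht hall
    cases t with
    | nil => simp [gr, Qrun]
    | cons x t =>
      have hx := hall x (List.mem_cons_self ..)
      have hsub : ∀ v ∈ x, v ∈ PySem.Set.update u x :=
        fun v hv => (mem_update_iff _ _ _).mpr (Or.inr hv)
      rw [gr, if_pos hx, Qrun, gr_filter x t _ hsub]
      congr 1
      apply ih _ _ (le_trans (List.length_filter_le _ _) (by simpa using ht))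
      intro y hy
      rcases List.mem_filter.mp hy with ⟨hyt, hni⟩
      rw [isdisjoint_iff']
      intro v hv
      rcases (mem_update_iff u x v).mp hv with hvu | hvx
      · exact (isdisjoint_iff' u y).mp (hall y (List.mem_cons_of_mem _ hyt)) v hvu
      · intro hvy; exact absurd ((pyInter_iff x y).mpr ⟨v, hvx, hvy⟩) (by simpa using hni)

-- A-side: the loop is a no-op once i reaches the candidate length
lemma aPass_stop (s : List (List Int)) (i j : Nat) (c : List (List Int)) (h : s.length ≤ j) :
    aPass s i j c = c := by
  rw [aPass, dif_neg (by omega)]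

lemma aOuter_noop : ∀ (k i : Nat) (c : List (List Int)), c.length ≤ i → aOuter k i c = c := by
  intro k
  induction k with
  | zero => intro i c _; rfl
  | succ k ih =>
    intro i c h
    by_cases hb : i > c.length
    · rw [aOuter, if_pos hb]
    · rw [aOuter, if_neg hb, aPass_stop _ _ _ _ (by omega), ih (i + 1) c (by omega)]

lemma removeD_middle (x : List Int) : ∀ (pre rest : List (List Int)), x ∉ pre →
    removeD (pre ++ x :: rest) x = pre ++ rest := by
  intro pre
  induction pre with
  | nil => intro rest _; simp [removeD, PySem.List.remove?_cons_self]
  | cons a pre ih =>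
    intro rest hx
    have hax : a ≠ x := fun h => hx (h ▸ List.mem_cons_self ..)
    have hxm : x ∉ pre := fun h => hx (List.mem_cons_of_mem _ h)
    have := ih rest hxm
    simp only [removeD] at this ⊢
    rw [List.cons_append, PySem.List.remove?_cons_of_ne _ hax]
    cases hr : PySem.List.remove? (pre ++ x :: rest) x with
    | none => simp [PySem.List.remove?_eq_none_iff] at hr
    | some c' => simp only [hr, Option.map_some] at this ⊢; rw [this]; simp

-- one inner pass filters the suffix against s[i]
lemma aPass_eq (s : List (List Int)) (i : Nat) : ∀ (n j : Nat) (pre : List (List Int)),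
    s.length - j ≤ n → i < j → (pre ++ s.drop j).Nodup →
    aPass s i j (pre ++ s.drop j) =
      pre ++ (s.drop j).filter (fun y => !pyInter (s.getD i []) y) := by
  intro n
  induction n with
  | zero =>
    intro j pre hn _ _
    rw [aPass_stop _ _ _ _ (by omega), List.drop_eq_nil_of_le (by omega)]
    simp
  | succ n ih =>
    intro j pre hn hij hnd
    by_cases hj : j < s.length
    · have hdrop : s.drop j = s[j] :: s.drop (j + 1) := List.drop_eq_getElem_cons hj
      have hget : s.getD j [] = s[j] := by
        simp [List.getD_eq_getElem?_getD, List.getElem?_eq_getElem hj]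
      rw [aPass, dif_pos hj, hget]
      by_cases hp : pyInter (s.getD i []) s[j] = true
      · have hxpre : s[j] ∉ pre := by
          rw [hdrop] at hnd
          intro hmem
          exact (List.disjoint_of_nodup_append hnd) hmem (List.mem_cons_self ..)
        rw [if_pos hp, hdrop, removeD_middle _ _ _ hxpre]
        have hnd' : (pre ++ s.drop (j + 1)).Nodup := by
          refine List.Nodup.sublist ?_ hnd
          rw [hdrop]
          exact List.Sublist.append_left (List.sublist_cons_self _ _) _
        rw [ih (j + 1) pre (by omega) (by omega) hnd', List.filter_cons_of_neg (by rw [hp]; decide)]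
      · have hp' : pyInter (s.getD i []) s[j] = false := by simpa using hp
        rw [if_neg (by rw [hp']; simp), hdrop]
        have hre : pre ++ s[j] :: s.drop (j + 1) = (pre ++ [s[j]]) ++ s.drop (j + 1) := by simp
        rw [hre, ih (j + 1) (pre ++ [s[j]]) (by omega) (by omega) (by rw [← hre, ← hdrop]; exact hnd),
          List.filter_cons_of_pos (by rw [hp']; rfl)]
        simp
    · rw [aPass_stop _ _ _ _ (by omega), List.drop_eq_nil_of_le (by omega)]
      simp

lemma Qrun_short (t : List (List Int)) (h : t.length ≤ 1) : Qrun t = t := by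
  match t, h with
  | [], _ => simp [Qrun]
  | [x], _ => simp [Qrun]

-- the outer loop computes done ++ Qrun todo
lemma aOuter_eq : ∀ (k : Nat) (done todo : List (List Int)), (done ++ todo).Nodup →
    todo.length ≤ k + 1 → aOuter k done.length (done ++ todo) = done ++ Qrun todo := by
  intro k
  induction k with
  | zero =>
    intro done todo _ hlen
    rw [aOuter, Qrun_short todo hlen]
  | succ k ih =>
    intro done todo hnd hlen
    cases todo with
    | nil => rw [aOuter_noop _ _ _ (by simp)]; simp [Qrun]
    | cons x t =>
      rw [aOuter, if_neg (by simp only [gt_iff_lt, List.length_append, List.length_cons]; omega)]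
      have hdrop1 : (done ++ x :: t).drop (done.length + 1) = t := by
        have h2 : done ++ x :: t = (done ++ [x]) ++ t := by simp
        rw [h2, List.drop_left' (by simp)]
      have hgi : (done ++ x :: t).getD done.length [] = x := by
        simp [List.getD_eq_getElem?_getD]
      have hpass := aPass_eq (done ++ x :: t) done.length (done ++ x :: t).length
        (done.length + 1) (done ++ [x]) (by omega) (by omega)
        (by rw [hdrop1]; simpa using hnd)
      rw [hdrop1, hgi, show (done ++ [x]) ++ t = done ++ x :: t by simp] at hpass
      rw [hpass]
      have hnd' : ((done ++ [x]) ++ t.filter (fun y => !pyInter x y)).Nodup := by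
        have hsub : List.Sublist ((done ++ [x]) ++ t.filter (fun y => !pyInter x y))
            ((done ++ [x]) ++ t) :=
          List.Sublist.append_left List.filter_sublist _
        exact List.Nodup.sublist (by simpa using hsub) hnd
      have hlen' : (t.filter (fun y => !pyInter x y)).length ≤ k + 1 :=
        le_trans (List.length_filter_le _ _) (by simp only [List.length_cons] at hlen; omega)
      have hrec := ih (done ++ [x]) (t.filter (fun y => !pyInter x y)) hnd' hlen'
      simp only [List.length_append, List.length_cons, List.length_nil] at hrec
      rw [hrec, Qrun]
      simp

-- ===== VERDICT (by name: the statement is the Claim_ definition above) =====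
theorem disjoint_lists_spec : Claim_equal_disjoint_lists := by
  intro input_l _ hpre
  unfold Spec_disjoint_lists disjoint_lists disjoint_lists_alt
  have hnd : (sortLen input_l).Nodup :=
    ((PySem.List.sorted_perm input_l (fun x => x.length) true).nodup_iff).mpr hpre
  have hA := aOuter_eq ((sortLen input_l).length - 1) [] (sortLen input_l)
    (by simpa using hnd) (by omega)
  simp only [List.length_nil, List.nil_append] at hA
  rw [hA, foldl_bStep _ [] PySem.Set.empty]
  simp only [List.nil_append]
  rw [gr_eq_Qrun (sortLen input_l).length _ _ (le_refl _)]
  intro y _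
  rw [isdisjoint_iff']
  intro v hv
  simp [PySem.Set.empty] at hv
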